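-- pv_equiv track=rewrite | github.com/ivasik-k7/tfkit | src/tfkit/inspector/resolver.py | _func_max
-- ===== SOURCE A (Python) =====
-- from typing import Any, Dict, List, Optional, Set
--
-- def _func_max(args: List[Any]) -> Optional[Any]:
--     """Return maximum value."""
--     if not args:
--         return None
--
--     # Filter out None values
--     valid_args = [arg for arg in args if arg is not None]
--
--     if not valid_args:
--         return None
--
--     try:
--         return max(valid_args)
--     except Exception:
--         return None
-- ===== SOURCE B (Python) =====
-- from typing import Any, List, Optional
--
-- def _func_max(args: List[Any]) -> Optional[Any]:
--     """Return maximum value (single pass, running maximum)."""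
--     best = None
--     for arg in args:
--         if arg is None:
--             continue
--         if best is None:
--             best = arg
--         else:
--             try:
--                 if arg > best:
--                     best = arg
--             except Exception:
--                 return None
--     return best
-- ===== Notes on version B (the rewrite author's own statement) =====
-- stated objective: simpler
-- what changed: Replaced the filter-into-a-list-then-max two-pass with a single loop that maintains a running maximum over the non-None elements.
import Mathlib
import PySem

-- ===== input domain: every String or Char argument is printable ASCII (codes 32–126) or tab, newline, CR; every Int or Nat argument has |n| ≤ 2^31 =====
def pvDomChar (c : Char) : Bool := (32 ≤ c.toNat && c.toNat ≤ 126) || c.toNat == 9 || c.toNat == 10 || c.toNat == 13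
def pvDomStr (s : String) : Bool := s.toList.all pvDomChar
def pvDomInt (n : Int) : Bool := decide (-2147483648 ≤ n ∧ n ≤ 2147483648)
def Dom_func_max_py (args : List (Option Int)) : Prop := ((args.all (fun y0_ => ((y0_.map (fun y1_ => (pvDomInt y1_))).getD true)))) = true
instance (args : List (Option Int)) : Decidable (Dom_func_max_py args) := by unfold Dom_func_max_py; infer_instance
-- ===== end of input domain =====

-- B replaces A's filter-then-max two-pass by a single loop maintaining a running maximum (objective: simpler).


-- ===== PORT A =====
-- 'max(valid_args)' on a nonempty list of ints never raises; ported as PySem.List.max?.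
def func_max_py (args : List (Option Int)) : Option Int :=
  if args = [] then none
  else
    let valid_args := args.filterMap (fun a => a)
    if valid_args = [] then none
    else PySem.List.max? valid_args (fun y => y)

-- ===== PORT B =====
def func_max_py_alt (args : List (Option Int)) : Option Int :=
  args.foldl (fun best arg =>
    match arg with
    | none => best
    | some x =>
      match best with
      | none => some x
      | some b => if x > b then some x else best) none

-- ===== PRECONDITION & SPEC =====
def Spec_func_max_py (args : List (Option Int)) (out : Option Int) : Prop := out = func_max_py_alt args
instance (args : List (Option Int)) (out : Option Int) : Decidable (Spec_func_max_py args out) := by unfold Spec_func_max_py; infer_instance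

-- ===== CLAIM (what is proved, stated in full; the proofs are below) =====
def Claim_equal_func_max_py : Prop := ∀ (args : List (Option Int)), Dom_func_max_py args → Spec_func_max_py args (func_max_py args)

-- ===== LEMMAS AND PROOFS =====
theorem alt_some (t : List (Option Int)) : ∀ b : Int,
    t.foldl (fun best arg =>
      match arg with
      | none => best
      | some x =>
        match best with
        | none => some x
        | some b => if x > b then some x else best) (some b)
    = some ((t.filterMap (fun a => a)).foldl max b) := by
  induction t with
  | nil => intro b; simp
  | cons a t ih =>
    intro b
    cases a with
    | none => simpa using ih b
    | some x =>
      have hmax : (if x > b then some x else some b) = some (max b x) := by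
        by_cases h : x > b
        · simp [h, max_eq_right (le_of_lt h)]
        · simp [h, max_eq_left (not_lt.mp h)]
      simpa [List.foldl, hmax] using ih (max b x)

theorem alt_eq (args : List (Option Int)) :
    func_max_py_alt args
    = match args.filterMap (fun a => a) with
      | [] => none
      | x :: xs => some (xs.foldl max x) := by
  induction args with
  | nil => rfl
  | cons a t ih =>
    cases a with
    | none => simpa [func_max_py_alt] using ih
    | some x =>
      simp only [func_max_py_alt, List.foldl, List.filterMap]
      exact alt_some t x

-- ===== VERDICT (by name: the statement is the Claim_ definition above) =====
theorem func_max_py_spec : Claim_equal_func_max_py := by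
  intro args _
  unfold Spec_func_max_py func_max_py
  by_cases h0 : args = []
  · subst h0; rfl
  · simp only [h0, if_false]
    rcases hv : args.filterMap (fun a => a) with _ | ⟨x, xs⟩
    · simp [alt_eq, hv]
    · simp [alt_eq, hv, PySem.List.max?_id_cons]
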